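-- pv_equiv track=rewrite | github.com/douymLab/PhyloSOLID | src/mutation_integrator.py | get_1stBranchSet
-- ===== SOURCE A (Python) =====
-- def intersect_is_self(v1, v0):
--     # If True, v1 is a subset of v0
--     v0_indices = [i for i, val in enumerate(v0) if val == 1]
--     v1_indices = [i for i, val in enumerate(v1) if val == 1]
--     v0_set = set(v0_indices)
--     v1_set = set(v1_indices)
--     if v1_set == v1_set.intersection(v0_set):
--         return True
--     else:
--         return False
--
-- def get_1stBranchSet(all_clusters):
--     pivot_clusters = []
--     for i, v1 in enumerate(all_clusters):
--         is_pivot = True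
--         for j, v0 in enumerate(all_clusters):
--             if i != j:
--                 if intersect_is_self(v1, v0):
--                     if intersect_is_self(v0, v1):
--                         continue
--                     else:
--                         is_pivot = False
--                         break
--         if is_pivot:
--             pivot_clusters.append(v1)
--     return pivot_clusters
-- ===== SOURCE B (Python) =====
-- def get_1stBranchSet(all_clusters):
--     sets = [frozenset(i for i, val in enumerate(c) if val == 1) for c in all_clusters]
--     order = sorted(range(len(sets)), key=lambda k: -len(sets[k]))
--     accepted = []
--     maximal = [False] * len(sets)
--     for k in order:
--         s = sets[k]
--         if not any(s < m for m in accepted):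
--             maximal[k] = True
--             accepted.append(s)
--     return [c for c, keep in zip(all_clusters, maximal) if keep]
-- ===== Notes on version B (the rewrite author's own statement) =====
-- stated objective: faster
-- what changed: Precomputes each cluster's frozenset of 1-indices once, processes clusters in decreasing set-size order keeping a list of accepted maximal sets (a cluster is dropped iff it is a proper subset of an accepted set), then emits kept clusters in original order - replacing A's all-pairs test that rebuilds both index sets for every ordered pair.
import Mathlib
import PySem

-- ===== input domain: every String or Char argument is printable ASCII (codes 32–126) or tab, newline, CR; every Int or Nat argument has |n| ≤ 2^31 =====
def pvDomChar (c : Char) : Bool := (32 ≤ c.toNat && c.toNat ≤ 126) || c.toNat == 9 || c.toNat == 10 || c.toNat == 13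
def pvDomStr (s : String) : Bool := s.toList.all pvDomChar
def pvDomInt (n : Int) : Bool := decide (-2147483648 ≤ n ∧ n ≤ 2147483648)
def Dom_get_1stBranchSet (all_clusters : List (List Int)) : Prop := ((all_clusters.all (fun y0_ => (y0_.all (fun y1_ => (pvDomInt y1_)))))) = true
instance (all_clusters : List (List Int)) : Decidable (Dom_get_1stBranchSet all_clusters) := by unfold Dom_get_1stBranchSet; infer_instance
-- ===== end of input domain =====

-- B replaces A's all-pairs subset testing (which rebuilds both index sets per ordered pair) by a
-- single pass over clusters in decreasing set-size order that maintains the accepted maximal sets.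

-- ===== PORT A =====
def intersect_is_self (v1 v0 : List Int) : Bool :=
  let v0_indices : List Int := ((PySem.List.enumerate v0).filter (fun p => p.2 == 1)).map (·.1)
  let v1_indices : List Int := ((PySem.List.enumerate v1).filter (fun p => p.2 == 1)).map (·.1)
  let v0_set : PySem.Set Int := PySem.Set.ofList v0_indices
  let v1_set : PySem.Set Int := PySem.Set.ofList v1_indices
  if PySem.Set.equal v1_set (PySem.Set.inter v1_set v0_set) then true else false

-- A's inner 'for j, v0 in enumerate(all_clusters)' with continue/break, returning is_pivot
def innerA (i : Int) (v1 : List Int) : List (Int × List Int) → Bool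
  | [] => true
  | (j, v0) :: rest =>
    if i ≠ j then
      if intersect_is_self v1 v0 then
        if intersect_is_self v0 v1 then innerA i v1 rest
        else false
      else innerA i v1 rest
    else innerA i v1 rest

def get_1stBranchSet (all_clusters : List (List Int)) : List (List Int) :=
  (PySem.List.enumerate all_clusters).foldl
    (fun pivot_clusters p =>
      if innerA p.1 p.2 (PySem.List.enumerate all_clusters) then pivot_clusters ++ [p.2]
      else pivot_clusters) []

-- ===== PORT B =====
-- {i for i, val in enumerate(c) if val == 1}
def oneSet (c : List Int) : PySem.Set Int :=
  PySem.Set.ofList (((PySem.List.enumerate c).filter (fun p => p.2 == 1)).map (·.1))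

-- Python's 's < m' on (frozen)sets: proper subset
def properLt (s m : PySem.Set Int) : Bool := PySem.Set.issubset s m && !PySem.Set.equal s m

def get_1stBranchSet_alt (all_clusters : List (List Int)) : List (List Int) :=
  let sets := all_clusters.map oneSet
  let order := PySem.List.sorted (List.range sets.length)
    (fun k => -(PySem.Set.len (sets.getD k []))) false
  let st := order.foldl
    (fun (st : List (PySem.Set Int) × List Bool) k =>
      let s := sets.getD k []
      if st.1.any (fun m => properLt s m) then st
      else (st.1 ++ [s], st.2.set k true))
    ([], List.replicate sets.length false)
  ((all_clusters.zip st.2).filter (·.2)).map (·.1)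

-- ===== PRECONDITION & SPEC =====
def Spec_get_1stBranchSet (all_clusters : List (List Int)) (out : List (List Int)) : Prop := out = get_1stBranchSet_alt all_clusters
instance (all_clusters : List (List Int)) (out : List (List Int)) : Decidable (Spec_get_1stBranchSet all_clusters out) := by unfold Spec_get_1stBranchSet; infer_instance

-- ===== CLAIM (what is proved, stated in full; the proofs are below) =====
def Claim_equal_get_1stBranchSet : Prop := ∀ (all_clusters : List (List Int)), Dom_get_1stBranchSet all_clusters → Spec_get_1stBranchSet all_clusters (get_1stBranchSet all_clusters)

-- ===== LEMMAS AND PROOFS =====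

-- membership-level subset of index sets
def SubP (a b : List Int) : Prop := ∀ x ∈ a, x ∈ b

-- the k-th index set of the input
def skF (l : List (List Int)) (k : Nat) : PySem.Set Int := (l.map oneSet).getD k []

-- "cluster k is maximal": its 1-index set is a proper subset of no other cluster's
def GoodP (l : List (List Int)) (k : Nat) : Prop :=
  ∀ j < l.length, ¬ (SubP (skF l k) (skF l j) ∧ ¬ SubP (skF l j) (skF l k))

lemma skF_lt {l : List (List Int)} {k : Nat} (h : k < l.length) :
    skF l k = oneSet l[k] := by
  simp [skF, List.getD, h]

lemma nodup_skF (l : List (List Int)) (k : Nat) : (skF l k).Nodup := by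
  by_cases h : k < l.length
  · rw [skF_lt h]; exact PySem.Set.nodup_ofList _
  · simp [skF, List.getD, List.getElem?_eq_none_iff.mpr (by simpa using Nat.le_of_not_lt h)]

lemma interIs_iff (v1 v0 : List Int) :
    intersect_is_self v1 v0 = true ↔ SubP (oneSet v1) (oneSet v0) := by
  simp only [intersect_is_self, oneSet, SubP]
  split_ifs with h
  · simp only [true_iff]
    rw [PySem.Set.equal_iff] at h
    intro x hx
    exact ((PySem.Set.mem_inter _ _ _).mp ((h x).mp hx)).2
  · simp only [false_iff]
    intro hsub
    exact h ((PySem.Set.equal_iff _ _).mpr (fun x => by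
      rw [PySem.Set.mem_inter]
      exact ⟨fun hx => ⟨hx, hsub x hx⟩, fun hx => hx.1⟩))

lemma properLt_iff (s m : PySem.Set Int) :
    properLt s m = true ↔ (SubP s m ∧ ¬ SubP m s) := by
  simp only [properLt, Bool.and_eq_true, Bool.not_eq_true', SubP]
  rw [PySem.Set.issubset_iff]
  constructor
  · rintro ⟨h1, h2⟩
    refine ⟨h1, fun hms => ?_⟩
    rw [← Bool.not_eq_true, PySem.Set.equal_iff] at h2
    exact h2 (fun x => ⟨fun hx => h1 x hx, fun hx => hms x hx⟩)
  · rintro ⟨h1, h2⟩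
    refine ⟨h1, ?_⟩
    rw [← Bool.not_eq_true, PySem.Set.equal_iff]
    intro heq
    exact h2 (fun x hx => (heq x).mpr hx)

lemma psub_length_lt {a b : List Int} (ha : a.Nodup)
    (h1 : SubP a b) (h2 : ¬ SubP b a) : a.length < b.length := by
  have hsp : a.Subperm b := ha.subperm h1
  rcases Nat.lt_or_ge a.length b.length with h | h
  · exact h
  · exact absurd (fun x hx => (hsp.perm_of_length_le h).mem_iff.mpr hx) h2

lemma sub_length_le {a b : List Int} (ha : a.Nodup) (h1 : SubP a b) :
    a.length ≤ b.length := (ha.subperm h1).length_le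

-- A's inner loop is a universally-quantified no-proper-superset check
lemma innerA_iff (i : Int) (v1 : List Int) (en : List (Int × List Int)) :
    innerA i v1 en = true ↔
      ∀ q ∈ en, ¬ (i ≠ q.1 ∧ SubP (oneSet v1) (oneSet q.2) ∧ ¬ SubP (oneSet q.2) (oneSet v1)) := by
  induction en with
  | nil => simp [innerA]
  | cons p rest ih =>
    obtain ⟨j, v0⟩ := p
    simp only [innerA]
    split_ifs with hij h1 h2
    · rw [ih]
      rw [interIs_iff] at h1 h2
      constructor
      · intro h q hq
        rcases List.mem_cons.mp hq with hq | hq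
        · subst hq; exact fun hc => hc.2.2 h2
        · exact h q hq
      · intro h q hq; exact h q (List.mem_cons_of_mem _ hq)
    · simp only [false_iff]
      intro h
      rw [interIs_iff] at h1
      exact h (j, v0) List.mem_cons_self ⟨hij, h1, fun hc => h2 ((interIs_iff _ _).mpr hc)⟩
    · rw [ih]
      constructor
      · intro h q hq
        rcases List.mem_cons.mp hq with hq | hq
        · subst hq; exact fun hc => h1 ((interIs_iff _ _).mpr hc.2.1)
        · exact h q hq
      · intro h q hq; exact h q (List.mem_cons_of_mem _ hq)
    · rw [ih]
      rw [not_not] at hij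
      constructor
      · intro h q hq
        rcases List.mem_cons.mp hq with hq | hq
        · subst hq; exact fun hc => hc.1 hij
        · exact h q hq
      · intro h q hq; exact h q (List.mem_cons_of_mem _ hq)

-- the B fold's step
def stepB (sets : List (PySem.Set Int)) (st : List (PySem.Set Int) × List Bool) (k : Nat) :
    List (PySem.Set Int) × List Bool :=
  let s := sets.getD k []
  if st.1.any (fun m => properLt s m) then st
  else (st.1 ++ [s], st.2.set k true)

lemma foldB_length (sets : List (PySem.Set Int)) :
    ∀ (todo : List Nat) (acc : List (PySem.Set Int)) (maxi : List Bool),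
    (todo.foldl (stepB sets) (acc, maxi)).2.length = maxi.length := by
  intro todo
  induction todo with
  | nil => intro acc maxi; rfl
  | cons k rest ih =>
    intro acc maxi
    simp only [List.foldl_cons, stepB]
    split_ifs
    · exact ih acc maxi
    · rw [ih]; exact List.length_set ..

lemma foldB_invariant (l : List (List Int)) :
    ∀ (todo done : List Nat) (acc : List (PySem.Set Int)) (maxi : List Bool),
    (done ++ todo).Pairwise (fun a b => (skF l b).length ≤ (skF l a).length) →
    (done ++ todo).Nodup →
    (∀ k ∈ done ++ todo, k < l.length) →
    (∀ j < l.length, j ∈ done ++ todo) →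
    maxi.length = l.length →
    (∀ m ∈ acc, ∃ k ∈ done, m = skF l k) →
    (∀ k ∈ done, ∃ m ∈ acc, SubP (skF l k) m) →
    (∀ k, maxi.getD k false = true ↔ (k ∈ done ∧ GoodP l k)) →
    (∀ k, (todo.foldl (stepB (l.map oneSet)) (acc, maxi)).2.getD k false = true ↔
      (k ∈ done ++ todo ∧ GoodP l k)) := by
  intro todo
  induction todo with
  | nil =>
    intro done acc maxi _ _ _ _ _ _ _ hI4 k
    simpa using hI4 k
  | cons k rest ih =>
    intro done acc maxi hpair hnodup hmem hcomp hlen hI1 hI2 hI4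
    have hk : k < l.length := hmem k (by simp)
    -- the accept condition decides maximality of k
    have keylem : acc.any (fun m => properLt (skF l k) m) = true ↔ ¬ GoodP l k := by
      constructor
      · intro h
        rcases List.any_eq_true.mp h with ⟨m, hm, hpm⟩
        rcases hI1 m hm with ⟨j, hjdone, rfl⟩
        have hj : j < l.length := hmem j (by simp [hjdone])
        intro hgood
        exact hgood j hj ((properLt_iff _ _).mp hpm)
      · intro hgood
        rw [GoodP] at hgood
        push_neg at hgood
        rcases hgood with ⟨j, hj, hsub, hnsub⟩
        have hjk : j ≠ k := by
          rintro rfl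
          exact hnsub (fun x hx => hx)
        have hlt : (skF l k).length < (skF l j).length :=
          psub_length_lt (nodup_skF l k) hsub hnsub
        have hjdone : j ∈ done := by
          rcases List.mem_append.mp (hcomp j hj) with h | h
          · exact h
          · rcases List.mem_cons.mp h with h | h
            · exact absurd h hjk
            · exfalso
              have hrel := (List.pairwise_cons.mp (List.pairwise_append.mp hpair).2.1).1 j h
              omega
        rcases hI2 j hjdone with ⟨m, hm, hsubm⟩
        rcases hI1 m hm with ⟨j', _, rfl⟩
        refine List.any_eq_true.mpr ⟨_, hm, (properLt_iff _ _).mpr ⟨fun x hx => hsubm x (hsub x hx), ?_⟩⟩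
        intro hms
        have h1 := sub_length_le (nodup_skF l j) hsubm
        have h2 := sub_length_le (nodup_skF l j') hms
        omega
    have hassoc : ∀ (r : List Nat), (done ++ [k]) ++ r = done ++ (k :: r) := by
      intro r; simp
    by_cases hacc : acc.any (fun m => properLt (skF l k) m) = true
    · -- k rejected: it is a proper subset of an accepted maximal set
      have hacc' : (acc.any fun m => properLt ((List.map oneSet l).getD k []) m) = true := hacc
      have hstep : stepB (l.map oneSet) (acc, maxi) k = (acc, maxi) := by
        simp only [stepB]
        rw [if_pos hacc']
      rw [List.foldl_cons, hstep]
      intro k'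
      rw [ih (done ++ [k]) acc maxi (by rw [hassoc]; exact hpair) (by rw [hassoc]; exact hnodup)
        (by rw [hassoc]; exact hmem) (by intro j hj; rw [hassoc]; exact hcomp j hj) hlen
        (fun m hm => by rcases hI1 m hm with ⟨j, hj, rfl⟩; exact ⟨j, by simp [hj], rfl⟩)
        (fun j hj => by
          rcases List.mem_append.mp hj with h | h
          · exact hI2 j h
          · rcases List.any_eq_true.mp hacc with ⟨m, hm, hpm⟩
            have := (properLt_iff _ _).mp hpm
            simp only [List.mem_singleton] at h
            subst h
            exact ⟨m, hm, this.1⟩)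
        (fun j => by
          rw [hI4 j]
          constructor
          · rintro ⟨h1, h2⟩; exact ⟨by simp [h1], h2⟩
          · rintro ⟨h1, h2⟩
            rcases List.mem_append.mp h1 with h | h
            · exact ⟨h, h2⟩
            · simp only [List.mem_singleton] at h
              subst h
              exact absurd h2 (keylem.mp hacc)) k']
      rw [hassoc]
    · -- k accepted as maximal
      have hstep : stepB (l.map oneSet) (acc, maxi) k
          = (acc ++ [(l.map oneSet).getD k []], maxi.set k true) := by
        have hacc' : ¬ (acc.any fun m => properLt ((List.map oneSet l).getD k []) m) = true := hacc
        simp only [stepB]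
        rw [if_neg hacc']
      have hsk : (l.map oneSet).getD k [] = skF l k := rfl
      have hgood : GoodP l k := by
        by_contra hg
        exact hacc (keylem.mpr hg)
      rw [List.foldl_cons, hstep, hsk]
      intro k'
      rw [ih (done ++ [k]) (acc ++ [skF l k]) (maxi.set k true)
        (by rw [hassoc]; exact hpair) (by rw [hassoc]; exact hnodup)
        (by rw [hassoc]; exact hmem) (by intro j hj; rw [hassoc]; exact hcomp j hj)
        (by rw [List.length_set]; exact hlen)
        (fun m hm => by
          rcases List.mem_append.mp hm with h | h
          · rcases hI1 m h with ⟨j, hj, rfl⟩; exact ⟨j, by simp [hj], rfl⟩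
          · simp only [List.mem_singleton] at h
            exact ⟨k, by simp, h⟩)
        (fun j hj => by
          rcases List.mem_append.mp hj with h | h
          · rcases hI2 j h with ⟨m, hm, hs⟩
            exact ⟨m, List.mem_append_left _ hm, hs⟩
          · simp only [List.mem_singleton] at h
            subst h
            exact ⟨skF l j, by simp, fun x hx => hx⟩)
        (fun j => by
          rw [List.getD_eq_getElem?_getD, List.getElem?_set]
          by_cases hjk : k = j
          · subst hjk
            rw [if_pos rfl, if_pos (by omega)]
            simp only [Option.getD_some]
            exact ⟨fun _ => ⟨by simp, hgood⟩, fun _ => by trivial⟩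
          · rw [if_neg hjk]
            rw [← List.getD_eq_getElem?_getD, hI4 j]
            constructor
            · rintro ⟨h1, h2⟩; exact ⟨by simp [h1], h2⟩
            · rintro ⟨h1, h2⟩
              rcases List.mem_append.mp h1 with h | h
              · exact ⟨h, h2⟩
              · simp only [List.mem_singleton] at h
                exact absurd h.symm hjk) k']
      rw [hassoc]

-- assemble: filter-by-flags over zip equals filter over enumerate
lemma zip_filter_eq (l : List (List Int)) :
    ∀ (maxi : List Bool) (q : Int × List Int → Bool) (s : Nat), maxi.length = l.length →
    (∀ (k : Nat) (h : k < l.length), maxi.getD k false = q (((s + k : Nat) : Int), l[k])) →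
    ((l.zip maxi).filter (·.2)).map (·.1) =
      ((PySem.List.enumerate l ((s : Nat) : Int)).filter q).map (·.2) := by
  induction l with
  | nil =>
    intro maxi q s hlen _
    have hm : maxi = [] := List.length_eq_zero_iff.mp (by simpa using hlen)
    subst hm
    simp [PySem.List.enumerate_nil]
  | cons a t ih =>
    intro maxi q s hlen hq
    match maxi with
    | b :: mt =>
      have hb : q (((s : Nat) : Int), a) = b := by
        have := hq 0 (by simp)
        simpa using this.symm
      have hrec := ih mt q (s + 1) (by simpa using hlen)
        (fun k hk => by
          have := hq (k + 1) (by simpa using hk)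
          simp only [List.getD_cons_succ] at this
          rw [this]
          congr 2
          push_cast
          ring)
      rw [PySem.List.enumerate_cons]
      have hcast : ((s : Nat) : Int) + 1 = (((s + 1 : Nat)) : Int) := by push_cast; ring
      rw [hcast]
      simp only [List.zip_cons_cons, List.filter_cons, hb]
      cases b
      · simpa using hrec
      · simpa using hrec

lemma good_iff_innerA (l : List (List Int)) (k : Nat) (hk : k < l.length) :
    GoodP l k ↔ innerA (k : Int) l[k] (PySem.List.enumerate l) = true := by
  rw [innerA_iff]
  constructor
  · intro hg q hq hc
    rcases (PySem.List.mem_enumerate_iff l 0 q).mp hq with ⟨j, hj, rfl⟩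
    apply hg j hj
    rw [skF_lt hk, skF_lt hj]
    exact ⟨hc.2.1, hc.2.2⟩
  · intro h j hj hc
    by_cases hjk : j = k
    · subst hjk
      rw [skF_lt hj] at hc
      exact hc.2 hc.1
    · rw [skF_lt hk, skF_lt hj] at hc
      exact h ((0 + (j : Int)), l[j]) ((PySem.List.mem_enumerate_iff l 0 _).mpr ⟨j, hj, rfl⟩)
        ⟨by intro he; exact hjk (by omega), hc.1, hc.2⟩

-- ===== VERDICT (by name: the statement is the Claim_ definition above) =====
theorem get_1stBranchSet_spec : Claim_equal_get_1stBranchSet := by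
  intro l _
  unfold Spec_get_1stBranchSet
  -- A's result as a filter over the enumeration
  have hA : get_1stBranchSet l =
      ((PySem.List.enumerate l).filter
        (fun p => innerA p.1 p.2 (PySem.List.enumerate l))).map (·.2) := by
    rw [get_1stBranchSet]
    rw [PySem.List.foldl_append_if (fun p => innerA p.1 p.2 (PySem.List.enumerate l))
      (fun p : Int × List Int => p.2) (PySem.List.enumerate l) []]
    simp
  -- B's result, with the fold abbreviated through stepB
  have hB : get_1stBranchSet_alt l =
      ((l.zip ((PySem.List.sorted (List.range (l.map oneSet).length)
          (fun k => -(PySem.Set.len ((l.map oneSet).getD k []))) false).foldl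
          (stepB (l.map oneSet))
          ([], List.replicate (l.map oneSet).length false)).2).filter (·.2)).map (·.1) := rfl
  have hlenF : ((PySem.List.sorted (List.range (l.map oneSet).length)
      (fun k => -(PySem.Set.len ((l.map oneSet).getD k []))) false).foldl
      (stepB (l.map oneSet)) ([], List.replicate (l.map oneSet).length false)).2.length
      = l.length := by
    rw [foldB_length]
    simp
  have hmemord : ∀ k : Nat, k ∈ PySem.List.sorted (List.range (l.map oneSet).length)
      (fun k => -(PySem.Set.len ((l.map oneSet).getD k []))) false ↔ k < l.length := by
    intro k
    rw [PySem.List.mem_sorted, List.mem_range, List.length_map]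
  have hinv := foldB_invariant l
    (PySem.List.sorted (List.range (l.map oneSet).length)
      (fun k => -(PySem.Set.len ((l.map oneSet).getD k []))) false)
    [] [] (List.replicate (l.map oneSet).length false)
    (by
      simp only [List.nil_append]
      refine (PySem.List.sorted_pairwise _ _).imp ?_
      intro a b h
      have h' : -(((skF l a).length : Int)) ≤ -(((skF l b).length : Int)) := h
      omega)
    (by
      simp only [List.nil_append]
      exact (PySem.List.sorted_perm _ _ _).nodup_iff.mpr (List.nodup_range))
    (by
      intro k hk
      exact (hmemord k).mp (by simpa using hk))
    (by
      intro j hj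
      simp only [List.nil_append]
      exact (hmemord j).mpr hj)
    (by simp)
    (by intro m hm; simp at hm)
    (by intro k hk; simp at hk)
    (by
      intro k
      constructor
      · intro h
        exfalso
        rw [List.getD_eq_getElem?_getD, List.getElem?_replicate] at h
        revert h
        split_ifs <;> simp
      · rintro ⟨h, _⟩
        simp at h)
  rw [hA, hB]
  refine Eq.symm ?_
  have := zip_filter_eq l
    ((PySem.List.sorted (List.range (l.map oneSet).length)
      (fun k => -(PySem.Set.len ((l.map oneSet).getD k []))) false).foldl
      (stepB (l.map oneSet)) ([], List.replicate (l.map oneSet).length false)).2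
    (fun p => innerA p.1 p.2 (PySem.List.enumerate l)) 0 hlenF
    (fun k hkl => by
      have hcast : (((0 + k : Nat)) : Int) = (k : Int) := by omega
      show _ = innerA (((0 + k : Nat) : Int)) l[k] (PySem.List.enumerate l)
      rw [hcast]
      apply Bool.eq_iff_iff.mpr
      rw [hinv k, List.nil_append, ← good_iff_innerA l k hkl]
      constructor
      · rintro ⟨_, hg⟩; exact hg
      · intro hg; exact ⟨(hmemord k).mpr hkl, hg⟩)
  simpa using this
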